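-- pv_equiv track=rewrite | github.com/Victor-Dixon/Dream.os | tools/add_ssot_tags_bulk.py | determine_ssot_domain
-- ===== SOURCE A (Python) =====
-- from typing import Dict, List, Tuple
--
-- DOMAIN_MAPPING: Dict[str, str] = {
--     "tools/communication/": "communication",
--     "tools/integration/": "integration",
--     "tools/infrastructure/": "infrastructure",
--     "tools/web/": "web",
--     "tools/coordination/": "communication",
--     "tools/analysis/": "tools",
--     "tools/consolidation/": "tools",
--     "tools/": "tools",  # Default for root-level tools
-- }
--
-- def determine_ssot_domain(file_path: str) -> str:
--     """Determine SSOT domain based on file path."""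
--     # Normalize path
--     normalized = file_path.replace("\\", "/")
--
--     # Check directory mapping (longest match first)
--     for dir_pattern, domain in sorted(
--         DOMAIN_MAPPING.items(), key=lambda x: len(x[0]), reverse=True
--     ):
--         if normalized.startswith(dir_pattern):
--             return domain
--
--     # Default domain
--     return "tools"
-- ===== SOURCE B (Python) =====
-- from typing import Dict
--
-- DOMAIN_MAPPING: Dict[str, str] = {
--     "tools/communication/": "communication",
--     "tools/integration/": "integration",
--     "tools/infrastructure/": "infrastructure",
--     "tools/web/": "web",
--     "tools/coordination/": "communication",
--     "tools/analysis/": "tools",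
--     "tools/consolidation/": "tools",
--     "tools/": "tools",  # Default for root-level tools
-- }
--
-- def determine_ssot_domain(file_path: str) -> str:
--     """Determine SSOT domain based on file path."""
--     normalized = file_path.replace("\\", "/")
--     # Every mapping key ends at a '/' boundary, so instead of scanning the
--     # whole mapping we enumerate the path's own directory-boundary prefixes,
--     # longest first, and do a direct dict lookup for each.
--     for i in range(len(normalized) - 1, -1, -1):
--         if normalized[i] == "/":
--             domain = DOMAIN_MAPPING.get(normalized[: i + 1])
--             if domain is not None:
--                 return domain
--     return "tools"
-- ===== Notes on version B (the rewrite author's own statement) =====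
-- stated objective: alternative
-- what changed: Instead of scanning all DOMAIN_MAPPING entries sorted by length, B walks the path's own '/'-boundary prefixes from longest to shortest and does a direct dict lookup on each, defaulting to 'tools'.
import Mathlib
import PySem

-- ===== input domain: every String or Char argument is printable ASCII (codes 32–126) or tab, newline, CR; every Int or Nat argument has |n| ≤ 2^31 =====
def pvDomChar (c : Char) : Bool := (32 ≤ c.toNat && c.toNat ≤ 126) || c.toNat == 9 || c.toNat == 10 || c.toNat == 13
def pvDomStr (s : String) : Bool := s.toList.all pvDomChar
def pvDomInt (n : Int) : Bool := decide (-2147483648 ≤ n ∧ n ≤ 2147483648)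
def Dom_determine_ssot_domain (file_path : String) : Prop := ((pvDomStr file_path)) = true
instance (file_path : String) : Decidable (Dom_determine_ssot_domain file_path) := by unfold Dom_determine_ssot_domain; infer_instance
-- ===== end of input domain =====

-- B replaces A's scan over the length-sorted DOMAIN_MAPPING by walking the path's own
-- '/'-boundary prefixes longest-first with direct dict lookups (alternative decomposition, same cost).


-- module constant DOMAIN_MAPPING (shared by A and B, as in the Python module)
def domainMapping : PySem.Dict String String := PySem.Dict.ofList [
  ("tools/communication/", "communication"),
  ("tools/integration/", "integration"),
  ("tools/infrastructure/", "infrastructure"),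
  ("tools/web/", "web"),
  ("tools/coordination/", "communication"),
  ("tools/analysis/", "tools"),
  ("tools/consolidation/", "tools"),
  ("tools/", "tools")]

-- ===== PORT A =====
-- the 'for dir_pattern, domain in …: if normalized.startswith(dir_pattern): return domain' loop
def aLoop : List (String × String) → String → String
  | [], _ => "tools"
  | (p, d) :: rest, normalized =>
      if PySem.Str.startswith normalized p then d else aLoop rest normalized

def determine_ssot_domain (file_path : String) : String :=
  let normalized := PySem.Str.replace file_path "\\" "/"
  aLoop (PySem.List.sorted domainMapping.items (fun x => PySem.Str.len x.1) true) normalized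

-- ===== PORT B =====
-- the 'for i in range(len(normalized) - 1, -1, -1)' loop; fuel j means current index i = j - 1
def bLoop (normalized : String) : Nat → String
  | 0 => "tools"
  | (i+1) =>
      if PySem.Str.pyGet? normalized (i : Int) = some '/' then
        match domainMapping.get? (PySem.Str.slice normalized none (some ((i : Int) + 1))) with
        | some d => d
        | none => bLoop normalized i
      else bLoop normalized i

def determine_ssot_domain_alt (file_path : String) : String :=
  let normalized := PySem.Str.replace file_path "\\" "/"
  bLoop normalized (PySem.Str.len normalized).toNat

-- ===== PRECONDITION & SPEC =====
def Spec_determine_ssot_domain (file_path : String) (out : String) : Prop := out = determine_ssot_domain_alt file_path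
instance (file_path : String) (out : String) : Decidable (Spec_determine_ssot_domain file_path out) := by unfold Spec_determine_ssot_domain; infer_instance

-- ===== CLAIM (what is proved, stated in full; the proofs are below) =====
def Claim_equal_determine_ssot_domain : Prop := ∀ (file_path : String), Dom_determine_ssot_domain file_path → Spec_determine_ssot_domain file_path (determine_ssot_domain file_path)

-- ===== LEMMAS AND PROOFS =====

-- the value of sorted(DOMAIN_MAPPING.items(), key=len, reverse=True): longest first, ties in insertion order
def sortedL : List (String × String) := [
  ("tools/infrastructure/", "infrastructure"),
  ("tools/communication/", "communication"),
  ("tools/consolidation/", "tools"),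
  ("tools/coordination/", "communication"),
  ("tools/integration/", "integration"),
  ("tools/analysis/", "tools"),
  ("tools/web/", "web"),
  ("tools/", "tools")]

theorem sorted_items_eq : PySem.List.sorted domainMapping.items (fun x => PySem.Str.len x.1) true = sortedL := by
  decide

-- A's scan, moved to the List Char side
def gscan : List (String × String) → List Char → String
  | [], _ => "tools"
  | (p, d) :: rest, t => if p.toList <+: t then d else gscan rest t

theorem aLoop_eq_gscan (l : List (String × String)) (s : String) : aLoop l s = gscan l s.toList := by
  induction l with
  | nil => rfl
  | cons pd rest ih =>
      obtain ⟨p, d⟩ := pd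
      simp [aLoop, gscan, ih, PySem.Chars.startswith_iff]

theorem prefix_take_succ (p cs : List Char) (i : Nat) (hi : i < cs.length)
    (hlast : p.getLast? = some '/')
    (h : cs[i] ≠ '/' ∨ p ≠ cs.take (i+1)) :
    p <+: cs.take (i+1) ↔ p <+: cs.take i := by
  rw [List.prefix_take_iff, List.prefix_take_iff]
  constructor
  · rintro ⟨hp, hlen⟩
    refine ⟨hp, ?_⟩
    by_cases h1 : p.length ≤ i
    · exact h1
    · exfalso
      have hlen' : p.length = i + 1 := by omega
      have hpe : p = cs.take (i+1) := by
        have := List.prefix_iff_eq_take.mp hp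
        rw [this, hlen']
      have hlastc : (cs.take (i+1)).getLast? = some cs[i] := by
        rw [List.getLast?_eq_getElem?]
        simp [List.length_take, Nat.min_eq_left (by omega : i + 1 ≤ cs.length)]
      rcases h with h | h
      · apply h
        have := hpe ▸ hlast
        rw [hlastc] at this
        exact Option.some.inj this
      · exact h hpe
  · rintro ⟨hp, hlen⟩; exact ⟨hp, by omega⟩

theorem gscan_take_succ (l : List (String × String))
    (hl : ∀ pd ∈ l, pd.1.toList.getLast? = some '/')
    (cs : List Char) (i : Nat) (hi : i < cs.length)
    (h : cs[i] ≠ '/' ∨ ∀ pd ∈ l, pd.1.toList ≠ cs.take (i+1)) :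
    gscan l (cs.take (i+1)) = gscan l (cs.take i) := by
  induction l with
  | nil => rfl
  | cons pd rest ih =>
      obtain ⟨p, d⟩ := pd
      have hcond := prefix_take_succ p.toList cs i hi (hl _ (List.mem_cons_self ..))
        (h.imp id (fun hh => hh _ (List.mem_cons_self ..)))
      by_cases hp : p.toList <+: cs.take i
      · simp only [gscan]; rw [if_pos (hcond.mpr hp), if_pos hp]
      · simp only [gscan]
        rw [if_neg (fun hx => hp (hcond.mp hx)), if_neg hp]
        exact ih (fun q hq => hl q (List.mem_cons_of_mem _ hq))
          (h.imp id (fun hh q hq => hh q (List.mem_cons_of_mem _ hq)))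

theorem domainMapping_eq_mk : domainMapping = PySem.Dict.mk [
  ("tools/communication/", "communication"),
  ("tools/integration/", "integration"),
  ("tools/infrastructure/", "infrastructure"),
  ("tools/web/", "web"),
  ("tools/coordination/", "communication"),
  ("tools/analysis/", "tools"),
  ("tools/consolidation/", "tools"),
  ("tools/", "tools")] := by decide

theorem sortedL_last_slash : ∀ pd ∈ sortedL, pd.1.toList.getLast? = some '/' := by decide

theorem get?_dm_some (cand d : String) (h : domainMapping.get? cand = some d) :
    gscan sortedL cand.toList = d := by
  rw [domainMapping_eq_mk] at h
  simp only [PySem.Dict.get?_mk_cons] at h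
  split_ifs at h with h1 h2 h3 h4 h5 h6 h7 h8
  · rw [← eq_of_beq h1, ← Option.some.inj h]; decide
  · rw [← eq_of_beq h2, ← Option.some.inj h]; decide
  · rw [← eq_of_beq h3, ← Option.some.inj h]; decide
  · rw [← eq_of_beq h4, ← Option.some.inj h]; decide
  · rw [← eq_of_beq h5, ← Option.some.inj h]; decide
  · rw [← eq_of_beq h6, ← Option.some.inj h]; decide
  · rw [← eq_of_beq h7, ← Option.some.inj h]; decide
  · rw [← eq_of_beq h8, ← Option.some.inj h]; decide
  · cases h

theorem get?_dm_none (cand : String) (h : domainMapping.get? cand = none) :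
    ∀ pd ∈ sortedL, pd.1.toList ≠ cand.toList := by
  rw [domainMapping_eq_mk] at h
  simp only [PySem.Dict.get?_mk_cons] at h
  split_ifs at h with h1 h2 h3 h4 h5 h6 h7 h8
  all_goals try (cases h)
  intro pd hpd heq
  have hc : pd.1 = cand := String.toList_inj.mp heq
  fin_cases hpd <;> simp_all

theorem bLoop_eq (s : String) (i : Nat) (hi : i ≤ s.toList.length) :
    bLoop s i = gscan sortedL (s.toList.take i) := by
  induction i with
  | zero => rw [List.take_zero]; rfl
  | succ i ih =>
      have hi' : i < s.toList.length := by omega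
      have hget : PySem.Str.pyGet? s (i : Int) = some s.toList[i] := by
        simp [List.getElem?_eq_getElem hi']
      have hcast : ((i : Int) + 1) = ((i + 1 : Nat) : Int) := by push_cast; ring
      have hcand : (PySem.Str.slice s none (some ((i : Int) + 1))).toList = s.toList.take (i+1) := by
        simp only [PySem.Str.toList_slice, PySem.Chars.slice_eq_listSlice]
        rw [hcast]
        exact PySem.List.slice_to_natCast s.toList (i+1)
      unfold bLoop
      rw [hget]
      by_cases hc : s.toList[i] = '/'
      · rw [if_pos (by rw [hc])]
        cases hm : domainMapping.get? (PySem.Str.slice s none (some ((i : Int) + 1))) with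
        | some d =>
            have := get?_dm_some _ _ hm
            rw [hcand] at this
            simp only [this]
        | none =>
            have hnone := get?_dm_none _ hm
            rw [hcand] at hnone
            simp only []
            rw [ih (by omega), ← gscan_take_succ sortedL sortedL_last_slash s.toList i hi' (Or.inr hnone)]
      · rw [if_neg (by intro hx; exact hc (Option.some.inj hx)), ih (by omega)]
        exact (gscan_take_succ sortedL sortedL_last_slash s.toList i hi' (Or.inl hc)).symm

-- ===== VERDICT (by name: the statement is the Claim_ definition above) =====
theorem determine_ssot_domain_spec : Claim_equal_determine_ssot_domain := by
  intro fp _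
  simp only [Spec_determine_ssot_domain, determine_ssot_domain, determine_ssot_domain_alt]
  have hlen : (PySem.Str.len (PySem.Str.replace fp "\\" "/")).toNat
      = (PySem.Str.replace fp "\\" "/").toList.length := by
    simp [PySem.Str.len_eq]
  rw [sorted_items_eq, aLoop_eq_gscan, hlen, bLoop_eq _ _ (le_refl _), List.take_length]
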